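-- pv_equiv track=rewrite | github.com/Kodyena/advent-of-code-2023 | Day 14/Part 2.py | move_rocks
-- ===== SOURCE A (Python) =====
-- def move_rocks(grid: list[str]):
--     new_grid = []
--     for row in grid:
--         sections = row.split('#')
--         new_sections = []
--         for section in sections:
--             n = section.count('O')
--             new_sections.append('.' * (len(section) - n) + 'O' * n)
--         new_grid.append("#".join(new_sections))
--     return new_grid
-- ===== SOURCE B (Python) =====
-- def move_rocks(grid: list[str]):
--     return ['#'.join(
--                 ''.join(sorted('O' if c == 'O' else '.' for c in section))
--                 for section in row.split('#'))
--             for row in grid]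
-- ===== Notes on version B (the rewrite author's own statement) =====
-- stated objective: simpler
-- what changed: Replaces the count-then-rebuild of each '#'-free section (count O's, concatenate '.'*(len-n)+'O'*n) by normalizing each character to 'O' or '.' and sorting, so the dots-then-O's layout falls out of the character order; the whole function becomes one comprehension.
import Mathlib
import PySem

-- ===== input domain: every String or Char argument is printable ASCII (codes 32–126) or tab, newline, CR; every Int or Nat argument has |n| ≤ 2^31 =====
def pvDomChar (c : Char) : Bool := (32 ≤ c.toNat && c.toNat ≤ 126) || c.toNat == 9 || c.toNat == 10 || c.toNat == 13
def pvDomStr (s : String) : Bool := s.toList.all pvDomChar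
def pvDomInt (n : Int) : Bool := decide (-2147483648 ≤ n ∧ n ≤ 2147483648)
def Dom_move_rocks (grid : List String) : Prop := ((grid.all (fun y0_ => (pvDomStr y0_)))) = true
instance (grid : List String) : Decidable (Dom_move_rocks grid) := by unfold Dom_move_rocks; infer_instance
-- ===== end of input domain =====

-- B replaces A's count-then-rebuild of each '#'-free section by normalize-and-sort (simpler, one comprehension); same return values.


-- ===== PORT A =====
def move_rocks (grid : List String) : List String :=
  grid.foldl (fun new_grid row =>
    let sections := (PySem.Str.split? row "#").getD []
    let new_sections := sections.foldl (fun ns sec =>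
      let n := PySem.Str.count sec "O"
      ns ++ [String.ofList (List.replicate ((PySem.Str.len sec - (n : Int)).toNat) '.'
                            ++ List.replicate n 'O')]) []
    new_grid ++ [PySem.Str.join "#" new_sections]) []

-- ===== PORT B =====
def move_rocks_alt (grid : List String) : List String :=
  grid.map (fun row =>
    PySem.Str.join "#" (((PySem.Str.split? row "#").getD []).map (fun sec =>
      String.ofList (PySem.List.sorted (sec.toList.map (fun c => if c == 'O' then 'O' else '.'))
                     (fun x => x) false))))

-- ===== PRECONDITION & SPEC =====
def Spec_move_rocks (grid : List String) (out : List String) : Prop := out = move_rocks_alt grid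
instance (grid : List String) (out : List String) : Decidable (Spec_move_rocks grid out) := by unfold Spec_move_rocks; infer_instance

-- ===== CLAIM (what is proved, stated in full; the proofs are below) =====
def Claim_equal_move_rocks : Prop := ∀ (grid : List String), Dom_move_rocks grid → Spec_move_rocks grid (move_rocks grid)

-- ===== LEMMAS AND PROOFS =====

-- Chars.count with a single-character needle is List.count
lemma count_go_single (v : Char) : ∀ (l : List Char) (fuel acc : Nat), l.length ≤ fuel →
    PySem.Chars.count.go [v] fuel l acc = acc + l.count v := by
  intro l
  induction l with
  | nil => intro fuel acc _; cases fuel <;> simp [PySem.Chars.count.go]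
  | cons h t ih =>
    intro fuel acc hf
    cases fuel with
    | zero => simp at hf
    | succ f =>
      rw [PySem.Chars.count.go]
      by_cases hv : h = v
      · subst hv
        simp only [List.length_cons] at hf
        simp only [List.isPrefixOf, beq_self_eq_true, Bool.true_and, List.isPrefixOf_nil_left,
          if_true, List.length_cons, List.drop_succ_cons, List.length_nil, List.drop_zero]
        rw [ih f (acc + 1) (by omega)]
        simp [List.count_cons]
        omega
      · simp only [List.length_cons] at hf
        have hpre : [v].isPrefixOf (h :: t) = false := by
          simp only [List.isPrefixOf, Bool.and_eq_false_iff, beq_eq_false_iff_ne, ne_eq]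
          exact Or.inl (Ne.symm hv)
        rw [hpre]
        simp only [Bool.false_eq_true, if_false]
        rw [ih f acc (by omega)]
        have hcc : (h :: t).count v = t.count v := by
          rw [List.count_cons]
          simp [hv]
        rw [hcc]

lemma count_single (v : Char) (l : List Char) :
    PySem.Chars.count l [v] = l.count v := by
  simp [PySem.Chars.count]
  rw [count_go_single v l l.length 0 le_rfl]
  omega

-- the normalized characters are a permutation of dots-then-O's
lemma perm_norm (cs : List Char) :
    (List.replicate (cs.length - cs.count 'O') '.' ++ List.replicate (cs.count 'O') 'O').Perm
      (cs.map (fun c => if c == 'O' then 'O' else '.')) := by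
  induction cs with
  | nil => simp
  | cons h t ih =>
    by_cases hO : h = 'O'
    · subst hO
      have hle : t.count 'O' ≤ t.length := List.count_le_length
      have hlen : (('O' :: t).length - ('O' :: t).count 'O') = t.length - t.count 'O' := by
        simp [List.count_cons]
      rw [hlen]
      simp only [List.count_cons_self, List.map_cons, beq_self_eq_true, if_true,
        List.replicate_succ]
      exact (List.perm_middle).trans (ih.cons 'O')
    · have hle : t.count 'O' ≤ t.length := List.count_le_length
      have hc : (h :: t).count 'O' = t.count 'O' := by
        rw [List.count_cons]
        simp [hO]
      rw [hc]
      have hlen : ((h :: t).length - t.count 'O') = (t.length - t.count 'O') + 1 := by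
        simp only [List.length_cons]; omega
      rw [hlen]
      have hmap : (fun c => if (c == 'O') = true then 'O' else '.') h = '.' := by
        simp [hO]
      simp only [List.map_cons, List.replicate_succ, List.cons_append, hmap]
      exact ih.cons '.'

-- the per-section core: sorting the normalized characters IS dots-then-O's
lemma section_core (cs : List Char) :
    PySem.List.sorted (cs.map (fun c => if c == 'O' then 'O' else '.')) (fun x => x) false
      = List.replicate (cs.length - cs.count 'O') '.' ++ List.replicate (cs.count 'O') 'O' := by
  apply PySem.List.sorted_id_eq_of_perm_of_pairwise
  · exact perm_norm cs
  · rw [List.pairwise_append]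
    refine ⟨List.pairwise_replicate.mpr (Or.inr le_rfl),
            List.pairwise_replicate.mpr (Or.inr le_rfl), ?_⟩
    intro a ha b hb
    rw [List.eq_of_mem_replicate ha, List.eq_of_mem_replicate hb]
    decide

lemma section_eq (s : String) :
    String.ofList (List.replicate ((PySem.Str.len s - (PySem.Str.count s "O" : Int)).toNat) '.'
                   ++ List.replicate (PySem.Str.count s "O") 'O')
      = String.ofList (PySem.List.sorted (s.toList.map (fun c => if c == 'O' then 'O' else '.'))
                       (fun x => x) false) := by
  rw [section_core]
  have h1 : PySem.Str.count s "O" = s.toList.count 'O' := by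
    rw [PySem.Str.count_eq]; exact count_single 'O' s.toList
  have hle : s.toList.count 'O' ≤ s.toList.length := List.count_le_length
  have h2 : ((PySem.Str.len s - (PySem.Str.count s "O" : Int))).toNat
      = s.toList.length - s.toList.count 'O' := by
    rw [h1, PySem.Str.len_eq]
    omega
  rw [h1] at h2 ⊢
  rw [h2]

-- ===== VERDICT (by name: the statement is the Claim_ definition above) =====
theorem move_rocks_spec : Claim_equal_move_rocks := by
  intro grid _
  unfold Spec_move_rocks move_rocks move_rocks_alt
  rw [PySem.List.foldl_append_singleton_eq_map]
  apply List.map_congr_left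
  intro row _
  congr 1
  rw [PySem.List.foldl_append_singleton_eq_map]
  apply List.map_congr_left
  intro s _
  exact section_eq s
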